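-- pv_equiv track=rewrite | github.com/slordsahil/faceprep_practice_ | transaction_only30.py | success_or_not
-- ===== SOURCE A (Python) =====
-- def success_or_not(N):
--     wallet=0
--     for i in N:
--         if i==30:
--             wallet+=30
--         else:
--             if i-30>wallet:
--                 return "unsuccessful"
--             else:
--                 wallet-=i-30
--                 wallet+=30
--     return "successful"
-- ===== SOURCE B (Python) =====
-- def success_or_not(N):
--     prefix = []
--     s = 0
--     for x in N:
--         s += x
--         prefix.append(s)
--     if any(s > 30 * (2 * j + 1) for j, s in enumerate(prefix)):
--         return "unsuccessful"
--     return "successful"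
-- ===== Notes on version B (the rewrite author's own statement) =====
-- stated objective: alternative
-- what changed: Replaces the wallet-balance simulation with branching (special-casing i==30) by building the list of prefix sums and testing each against the closed-form threshold 30*(2j+1); no wallet state and no per-element branch order.
import Mathlib
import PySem

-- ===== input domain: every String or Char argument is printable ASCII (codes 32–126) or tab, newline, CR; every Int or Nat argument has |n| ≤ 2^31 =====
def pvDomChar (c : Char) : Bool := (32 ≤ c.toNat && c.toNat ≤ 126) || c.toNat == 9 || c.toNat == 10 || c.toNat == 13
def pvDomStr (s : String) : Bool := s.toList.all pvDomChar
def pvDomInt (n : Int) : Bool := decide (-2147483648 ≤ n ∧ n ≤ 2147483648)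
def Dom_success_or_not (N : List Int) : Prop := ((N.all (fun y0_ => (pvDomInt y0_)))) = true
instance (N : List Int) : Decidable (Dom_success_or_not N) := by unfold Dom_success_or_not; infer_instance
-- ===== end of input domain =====

-- B maintains no wallet: it builds the prefix sums and compares each against the closed-form threshold 30*(2j+1); same values everywhere (alternative decomposition, not faster).

-- ===== PORT A =====
-- A's loop over N carrying the wallet accumulator, branches in source order.
def pvGoA : List Int → Int → String
  | [], _ => "successful"
  | i :: rest, wallet =>
    if i = 30 then pvGoA rest (wallet + 30)
    else if i - 30 > wallet then "unsuccessful"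
    else pvGoA rest (wallet - (i - 30) + 30)

def success_or_not (N : List Int) : String := pvGoA N 0

-- ===== PORT B =====
-- Source B's first loop: append the running sum s+x for each element.
def pvPrefix : List Int → Int → List Int
  | [], _ => []
  | x :: rest, s => (s + x) :: pvPrefix rest (s + x)

def success_or_not_alt (N : List Int) : String :=
  let pre := pvPrefix N 0
  if (PySem.List.enumerate pre 0).any (fun p => decide (p.2 > 30 * (2 * p.1 + 1))) then
    "unsuccessful"
  else "successful"

-- ===== PRECONDITION & SPEC =====
def Spec_success_or_not (N : List Int) (out : String) : Prop := out = success_or_not_alt N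
instance (N : List Int) (out : String) : Decidable (Spec_success_or_not N out) := by unfold Spec_success_or_not; infer_instance

-- ===== CLAIM (what is proved, stated in full; the proofs are below) =====
def Claim_equal_success_or_not : Prop := ∀ (N : List Int), Dom_success_or_not N → Spec_success_or_not N (success_or_not N)

-- ===== LEMMAS AND PROOFS =====
-- Invariant: the wallet before the j-th element equals 60*j - (sum of the first j elements),
-- and it is never negative; A's failure test there coincides with B's threshold test.
theorem pvGoA_eq_enum (N : List Int) : ∀ (j s : Int), 0 ≤ 60 * j - s →
    pvGoA N (60 * j - s) =
      if (PySem.List.enumerate (pvPrefix N s) j).any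
          (fun p => decide (p.2 > 30 * (2 * p.1 + 1))) then "unsuccessful" else "successful" := by
  induction N with
  | nil => intro j s _; simp [pvGoA, pvPrefix]
  | cons x rest ih =>
    intro j s hw
    simp only [pvPrefix, PySem.List.enumerate_cons, List.any_cons]
    by_cases hx : x = 30
    · subst hx
      have hc : (decide (s + 30 > 30 * (2 * j + 1))) = false := by
        simp only [decide_eq_false_iff_not]; omega
      have h1 : 60 * j - s + 30 = 60 * (j + 1) - (s + 30) := by ring
      have h2 : pvGoA (30 :: rest) (60 * j - s) = pvGoA rest (60 * j - s + 30) := by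
        simp [pvGoA]
      rw [h2, h1, ih (j + 1) (s + 30) (by omega)]
      simp only [hc, Bool.false_or]
    · by_cases hf : x - 30 > 60 * j - s
      · have hc : s + x > 30 * (2 * j + 1) := by omega
        simp [pvGoA, hx, hf, hc]
      · have hc : (decide (s + x > 30 * (2 * j + 1))) = false := by
          simp only [decide_eq_false_iff_not]; omega
        have h1 : 60 * j - s - (x - 30) + 30 = 60 * (j + 1) - (s + x) := by ring
        have h2 : pvGoA (x :: rest) (60 * j - s) = pvGoA rest (60 * j - s - (x - 30) + 30) := by
          simp [pvGoA, hx, hf]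
        rw [h2, h1, ih (j + 1) (s + x) (by omega)]
        simp only [hc, Bool.false_or]

-- ===== VERDICT (by name: the statement is the Claim_ definition above) =====
theorem success_or_not_spec : Claim_equal_success_or_not := by
  intro N _
  unfold Spec_success_or_not success_or_not success_or_not_alt
  have h := pvGoA_eq_enum N 0 0 (by omega)
  simpa using h
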